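-- pv_equiv track=rewrite | github.com/aditeyabaral/spongebob-as-a-service | app/utils.py | convertCaptionsCamelCase
-- ===== SOURCE A (Python) =====
-- import string
--
-- def convertCaptionsCamelCase(captions):
--     n_words = [len(caption.split()) for caption in captions]
--     text = " ".join(captions).lower()
--     new_text = str()
--     flag = False
--     for ch in text:
--         if ch in string.ascii_lowercase:
--             if flag:
--                 new_text += ch.upper()
--                 flag = False
--             else:
--                 new_text += ch
--                 flag = True
--         else:
--             new_text += ch
--
--     new_text = new_text.split()
--     new_captions = list()
--     pos = 0
--     for _, ctr in enumerate(n_words):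
--         new_captions.append(" ".join(new_text[pos: pos + ctr]))
--         pos += ctr
--     return new_captions
-- ===== SOURCE B (Python) =====
-- import string
--
-- def convertCaptionsCamelCase(captions):
--     flag = False
--     result = []
--     for caption in captions:
--         words = []
--         for word in caption.split():
--             chars = []
--             for ch in word.lower():
--                 if ch in string.ascii_lowercase:
--                     if flag:
--                         chars.append(ch.upper())
--                         flag = False
--                     else:
--                         chars.append(ch)
--                         flag = True
--                 else:
--                     chars.append(ch)
--             words.append("".join(chars))
--         result.append(" ".join(words))
--     return result
-- ===== Notes on version B (the rewrite author's own statement) =====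
-- stated objective: simpler
-- what changed: B drops A's n_words array, the single big joined-and-lowered string, and the position-sliced regrouping pass, replacing them with a direct per-caption/per-word loop that threads the single case-toggle flag across word and caption boundaries.
import Mathlib
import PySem

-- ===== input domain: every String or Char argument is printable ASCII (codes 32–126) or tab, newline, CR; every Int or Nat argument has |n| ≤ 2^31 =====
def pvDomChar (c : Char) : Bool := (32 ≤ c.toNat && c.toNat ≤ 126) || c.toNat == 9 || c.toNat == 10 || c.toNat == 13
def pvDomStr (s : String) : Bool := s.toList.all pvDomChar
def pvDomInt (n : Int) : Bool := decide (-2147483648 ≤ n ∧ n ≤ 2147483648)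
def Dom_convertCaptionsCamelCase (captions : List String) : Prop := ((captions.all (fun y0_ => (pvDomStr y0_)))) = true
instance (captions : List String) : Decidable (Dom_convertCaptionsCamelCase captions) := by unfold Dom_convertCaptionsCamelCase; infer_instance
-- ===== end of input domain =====

-- ===== PORT A =====
-- B is a simpler decomposition: per-caption/per-word loops threading the one case-toggle
-- flag, instead of A's n_words array + whole-text join/lower pass + position-sliced regrouping.
def convertCaptionsCamelCase (captions : List String) : List String :=
  let n_words : List Int := captions.map (fun caption => ((PySem.Str.split₀ caption).length : Int))
  let text : List Char := (PySem.Str.lower (PySem.Str.join " " captions)).toList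
  -- for ch in text: the if-chain of A, state = (new_text, flag); `ch in string.ascii_lowercase` = 'a' ≤ ch ≤ 'z'
  let r := text.foldl (fun (st : List Char × Bool) ch =>
      if 'a' ≤ ch ∧ ch ≤ 'z' then
        if st.2 then (st.1 ++ [PySem.Chars.upperChar ch], false)
        else (st.1 ++ [ch], true)
      else (st.1 ++ [ch], st.2)) (([] : List Char), false)
  let new_text : List (List Char) := PySem.Chars.split₀ r.1
  let fin := n_words.foldl (fun (st : List String × Int) ctr =>
      (st.1 ++ [String.ofList (PySem.Chars.join [' '] (PySem.List.slice new_text (some st.2) (some (st.2 + ctr))))],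
       st.2 + ctr)) (([] : List String), (0 : Int))
  fin.1

-- ===== PORT B =====
def convertCaptionsCamelCase_alt (captions : List String) : List String :=
  let r := captions.foldl (fun (st : List String × Bool) caption =>
    let ws := (PySem.Str.split₀ caption).foldl (fun (wst : List (List Char) × Bool) word =>
        let cs := (PySem.Str.lower word).toList.foldl (fun (c : List Char × Bool) ch =>
            if 'a' ≤ ch ∧ ch ≤ 'z' then
              if c.2 then (c.1 ++ [PySem.Chars.upperChar ch], false)
              else (c.1 ++ [ch], true)
            else (c.1 ++ [ch], c.2)) (([] : List Char), wst.2)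
        (wst.1 ++ [cs.1], cs.2)) (([] : List (List Char)), st.2)
    (st.1 ++ [String.ofList (PySem.Chars.join [' '] ws.1)], ws.2)) (([] : List String), false)
  r.1

-- ===== PRECONDITION & SPEC =====
def Spec_convertCaptionsCamelCase (captions : List String) (out : List String) : Prop := out = convertCaptionsCamelCase_alt captions
instance (captions : List String) (out : List String) : Decidable (Spec_convertCaptionsCamelCase captions out) := by unfold Spec_convertCaptionsCamelCase; infer_instance

-- ===== CLAIM (what is proved, stated in full; the proofs are below) =====
def Claim_equal_convertCaptionsCamelCase : Prop := ∀ (captions : List String), Dom_convertCaptionsCamelCase captions → Spec_convertCaptionsCamelCase captions (convertCaptionsCamelCase captions)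

-- ===== LEMMAS AND PROOFS =====

-- the shared char-level state step: lower the char, then A's/B's toggle
def gbody (st : List Char × Bool) (ch : Char) : List Char × Bool :=
  if 'a' ≤ ch ∧ ch ≤ 'z' then
    if st.2 then (st.1 ++ [PySem.Chars.upperChar ch], false)
    else (st.1 ++ [ch], true)
  else (st.1 ++ [ch], st.2)

def lstep (f : Bool) (c : Char) : Char × Bool :=
  let d := PySem.Chars.lowerChar c
  if 'a' ≤ d ∧ d ≤ 'z' then (if f then (PySem.Chars.upperChar d, false) else (d, true)) else (d, f)

def lrun : Bool → List Char → List Char × Bool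
  | f, [] => ([], f)
  | f, c :: cs =>
    let r := lrun (lstep f c).2 cs
    ((lstep f c).1 :: r.1, r.2)

def lwords : Bool → List (List Char) → List (List Char) × Bool
  | f, [] => ([], f)
  | f, w :: ws =>
    let r := lwords (lrun f w).2 ws
    ((lrun f w).1 :: r.1, r.2)

def nsp (c : Char) : Bool := !PySem.Chars.isspace c

def splitW : List Char → List (List Char)
  | [] => []
  | c :: cs =>
    if PySem.Chars.isspace c then splitW cs
    else (c :: cs.takeWhile nsp) :: splitW (cs.dropWhile nsp)
termination_by s => s.length
decreasing_by
  · simp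
  · have := List.length_dropWhile_le nsp cs; simp; omega

def bgo : Bool → List String → List String × Bool
  | f, [] => ([], f)
  | f, cap :: caps =>
    let ws := lwords f (splitW cap.toList)
    let r := bgo ws.2 caps
    (String.ofList (PySem.Chars.join [' '] ws.1) :: r.1, r.2)

-- characters
lemma charle (c d : Char) : (c ≤ d) = (c.toNat ≤ d.toNat) :=
  propext ⟨fun h => Fin.mk_le_mk.mp h, fun h => Char.le_def.mpr h⟩

lemma toNat_ofNat' {n : Nat} (h : n < 55296) : (Char.ofNat n).toNat = n := by
  have hv : n.isValidChar := Or.inl h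
  rw [Char.toNat_ofNat, if_pos hv]

lemma isspace_iff (c : Char) : PySem.Chars.isspace c = true ↔
    (c.toNat = 32 ∨ (9 ≤ c.toNat ∧ c.toNat ≤ 13) ∨ (28 ≤ c.toNat ∧ c.toNat ≤ 31) ∨ c.toNat = 133 ∨
     c.toNat = 160 ∨ c.toNat = 5760 ∨ (8192 ≤ c.toNat ∧ c.toNat ≤ 8202) ∨ c.toNat = 8232 ∨
     c.toNat = 8233 ∨ c.toNat = 8239 ∨ c.toNat = 8287 ∨ c.toNat = 12288) := by
  simp [PySem.Chars.isspace]; tauto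

lemma isupper_iff (c : Char) : PySem.Chars.isupper c = true ↔ (65 ≤ c.toNat ∧ c.toNat ≤ 90) := by
  simp [PySem.Chars.isupper, charle]

lemma lowcond_iff (c : Char) : ('a' ≤ c ∧ c ≤ 'z') ↔ (97 ≤ c.toNat ∧ c.toNat ≤ 122) := by
  rw [charle, charle]; rfl

lemma lstep_space {c : Char} (h : PySem.Chars.isspace c = true) (f : Bool) : lstep f c = (c, f) := by
  rw [isspace_iff] at h
  have hu : PySem.Chars.isupper c = false := by
    rw [Bool.eq_false_iff]; intro hc; rw [isupper_iff] at hc; omega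
  have hd : PySem.Chars.lowerChar c = c := by simp [PySem.Chars.lowerChar, hu]
  have hl : ¬ ('a' ≤ c ∧ c ≤ 'z') := by rw [lowcond_iff]; omega
  simp [lstep, hd, hl]

lemma isspace_false_of_toNat {c : Char} (h1 : 33 ≤ c.toNat) (h2 : c.toNat ≤ 126) :
    PySem.Chars.isspace c = false := by
  rw [Bool.eq_false_iff]; intro hs; rw [isspace_iff] at hs; omega

lemma isspace_lstep (f : Bool) (c : Char) :
    PySem.Chars.isspace ((lstep f c).1) = PySem.Chars.isspace c := by
  by_cases hl : ('a' ≤ PySem.Chars.lowerChar c ∧ PySem.Chars.lowerChar c ≤ 'z')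
  · have hdn := (lowcond_iff _).mp hl
    have hcn : 65 ≤ c.toNat ∧ c.toNat ≤ 122 := by
      by_cases hu : PySem.Chars.isupper c = true
      · have := (isupper_iff c).mp hu; omega
      · have hd : PySem.Chars.lowerChar c = c := by simp [PySem.Chars.lowerChar, hu]
        rw [hd] at hdn; omega
    have hC : PySem.Chars.isspace c = false := isspace_false_of_toNat (by omega) (by omega)
    have hupn : (PySem.Chars.upperChar (PySem.Chars.lowerChar c)).toNat =
        (PySem.Chars.lowerChar c).toNat - 32 := by
      have hil : PySem.Chars.islower (PySem.Chars.lowerChar c) = true := by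
        simp only [PySem.Chars.islower, Bool.and_eq_true, decide_eq_true_iff]; exact hl
      simp only [PySem.Chars.upperChar, hil, if_true]
      exact toNat_ofNat' (by omega)
    rw [hC]
    cases f
    · have h1 : (lstep false c).1 = PySem.Chars.lowerChar c := by
        simp only [lstep]; rw [if_pos hl]; simp
      rw [h1]; exact isspace_false_of_toNat (by omega) (by omega)
    · have h1 : (lstep true c).1 = PySem.Chars.upperChar (PySem.Chars.lowerChar c) := by
        simp only [lstep]; rw [if_pos hl]; simp
      rw [h1]; exact isspace_false_of_toNat (by omega) (by omega)
  · have h1 : (lstep f c).1 = PySem.Chars.lowerChar c := by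
      simp only [lstep]; rw [if_neg hl]
    rw [h1]
    by_cases hu : PySem.Chars.isupper c = true
    · exfalso; apply hl
      have hun := (isupper_iff c).mp hu
      have h2 : (PySem.Chars.lowerChar c).toNat = c.toNat + 32 := by
        simp only [PySem.Chars.lowerChar, hu, if_true]; exact toNat_ofNat' (by omega)
      rw [lowcond_iff]; omega
    · have hd : PySem.Chars.lowerChar c = c := by simp [PySem.Chars.lowerChar, hu]
      rw [hd]

lemma gbody_lstep (acc : List Char) (f : Bool) (c : Char) :
    gbody (acc, f) (PySem.Chars.lowerChar c) = (acc ++ [(lstep f c).1], (lstep f c).2) := by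
  simp only [gbody, lstep]
  by_cases hl : ('a' ≤ PySem.Chars.lowerChar c ∧ PySem.Chars.lowerChar c ≤ 'z')
  · rw [if_pos hl, if_pos hl]; cases f <;> simp
  · rw [if_neg hl, if_neg hl]

-- the foldl of the shared char body over a lowered string is lrun
lemma foldl_gbody (cs : List Char) : ∀ (acc : List Char) (f : Bool),
    (PySem.Chars.lower cs).foldl gbody (acc, f) = (acc ++ (lrun f cs).1, (lrun f cs).2) := by
  induction cs with
  | nil => intro acc f; simp [PySem.Chars.lower, lrun]
  | cons c cs ih =>
    intro acc f
    simp only [PySem.Chars.lower, List.map_cons, List.foldl_cons] at *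
    rw [gbody_lstep, ih]
    simp [lrun]

lemma lrun_append (xs ys : List Char) (f : Bool) :
    lrun f (xs ++ ys) = ((lrun f xs).1 ++ (lrun (lrun f xs).2 ys).1, (lrun (lrun f xs).2 ys).2) := by
  induction xs generalizing f with
  | nil => simp [lrun]
  | cons c cs ih => simp [lrun, ih]

lemma lrun_nsp {w : List Char} (hw : ∀ c ∈ w, nsp c = true) (f : Bool) :
    ∀ x ∈ (lrun f w).1, nsp x = true := by
  induction w generalizing f with
  | nil => simp [lrun]
  | cons c cs ih =>
    intro x hx
    simp only [lrun, List.mem_cons] at hx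
    rcases hx with h | h
    · subst h
      have := isspace_lstep f c
      have hc := hw c (by simp)
      simp only [nsp] at *
      rw [this]; exact hc
    · exact ih (fun d hd => hw d (by simp [hd])) _ x h

lemma lwords_append (ws1 ws2 : List (List Char)) (f : Bool) :
    lwords f (ws1 ++ ws2) =
      ((lwords f ws1).1 ++ (lwords (lwords f ws1).2 ws2).1, (lwords (lwords f ws1).2 ws2).2) := by
  induction ws1 generalizing f with
  | nil => simp [lwords]
  | cons w ws ih => simp [lwords, ih]

lemma lwords_length (ws : List (List Char)) (f : Bool) : (lwords f ws).1.length = ws.length := by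
  induction ws generalizing f with
  | nil => simp [lwords]
  | cons w ws ih => simp [lwords, ih]

-- split₀ equals the structural splitW
lemma go_acc (s : List Char) : ∀ (cur : List Char) (acc : List (List Char)),
    PySem.Chars.split₀.go s cur acc = acc.reverse ++ PySem.Chars.split₀.go s cur [] := by
  induction s with
  | nil =>
    intro cur acc
    rw [PySem.Chars.split₀.go, PySem.Chars.split₀.go]
    by_cases h : cur.isEmpty <;> simp [h]
  | cons c cs ih =>
    intro cur acc
    conv_lhs => rw [PySem.Chars.split₀.go]
    conv_rhs => rw [PySem.Chars.split₀.go]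
    by_cases hs : PySem.Chars.isspace c = true
    · rw [if_pos hs, if_pos hs]
      by_cases hc : cur.isEmpty
      · rw [if_pos hc, if_pos hc]; exact ih [] acc
      · rw [if_neg hc, if_neg hc]
        rw [ih [] (cur.reverse :: acc), ih [] [cur.reverse]]
        simp
    · rw [if_neg hs, if_neg hs]; exact ih (c :: cur) acc

lemma go_word (w : List Char) (hw : ∀ c ∈ w, nsp c = true) :
    ∀ (s cur : List Char), PySem.Chars.split₀.go (w ++ s) cur [] = PySem.Chars.split₀.go s (w.reverse ++ cur) [] := by
  induction w with
  | nil => simp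
  | cons c w ih =>
    intro s cur
    have hc : PySem.Chars.isspace c = false := by
      have := hw c (by simp); simpa [nsp] using this
    rw [List.cons_append, PySem.Chars.split₀.go, if_neg (by simp [hc])]
    rw [ih (fun d hd => hw d (by simp [hd])) s (c :: cur)]
    simp

lemma nsp_dropWhile_head {cs : List Char} {d : Char} {r' : List Char}
    (h : cs.dropWhile nsp = d :: r') : PySem.Chars.isspace d = true := by
  have h1 := List.head?_dropWhile_not nsp cs
  rw [h] at h1
  simp only [List.head?_cons] at h1
  simpa [nsp] using h1

lemma split₀_eq_splitW (s : List Char) : PySem.Chars.split₀ s = splitW s := by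
  suffices h : ∀ (n : Nat) (s : List Char), s.length ≤ n → PySem.Chars.split₀ s = splitW s from
    h s.length s le_rfl
  intro n
  induction n with
  | zero =>
    intro s hs
    have h0 : s = [] := by cases s with | nil => rfl | cons a b => simp at hs
    subst h0
    simp only [PySem.Chars.split₀]
    rw [PySem.Chars.split₀.go]
    simp [splitW]
  | succ n ih =>
    intro s hs
    cases s with
    | nil =>
      simp only [PySem.Chars.split₀]
      rw [PySem.Chars.split₀.go]
      simp [splitW]
    | cons c cs =>
      simp only [PySem.Chars.split₀]
      rw [PySem.Chars.split₀.go]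
      by_cases hc : PySem.Chars.isspace c = true
      · rw [if_pos hc]
        simp only [List.isEmpty_nil, if_true]
        have h1 := ih cs (by simpa using Nat.le_of_succ_le_succ hs)
        simp only [PySem.Chars.split₀] at h1
        rw [h1]
        simp only [splitW, hc, if_true]
      · rw [if_neg hc]
        have hcs : cs.takeWhile nsp ++ cs.dropWhile nsp = cs := List.takeWhile_append_dropWhile
        have hw : ∀ d ∈ cs.takeWhile nsp, nsp d = true := fun d hd => List.mem_takeWhile_imp hd
        conv_lhs => rw [← hcs]
        rw [go_word _ hw _ [c]]
        simp only [splitW, hc, Bool.false_eq_true, if_false]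
        cases hr : cs.dropWhile nsp with
        | nil =>
          rw [PySem.Chars.split₀.go]
          simp [splitW]
        | cons d r' =>
          have hd : PySem.Chars.isspace d = true := nsp_dropWhile_head hr
          rw [PySem.Chars.split₀.go, if_pos hd, if_neg (by simp)]
          rw [go_acc]
          have hlen : r'.length ≤ n := by
            have h1 : (cs.dropWhile nsp).length ≤ cs.length := List.length_dropWhile_le nsp cs
            rw [hr] at h1
            simp only [List.length_cons] at h1 hs
            omega
          have h1 := ih r' hlen
          simp only [PySem.Chars.split₀] at h1
          rw [show splitW (d :: r') = splitW r' from by simp only [splitW, hd, if_true]]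
          rw [h1]
          simp

lemma nsp_space : nsp ' ' = false := by decide

lemma takeWhile_append_stop (cs ys : List Char) :
    (cs ++ ' ' :: ys).takeWhile nsp = cs.takeWhile nsp := by
  induction cs with
  | nil => simp [nsp_space]
  | cons c cs ih => cases h : nsp c <;> simp [h, ih]

lemma dropWhile_append_stop (cs ys : List Char) :
    (cs ++ ' ' :: ys).dropWhile nsp = cs.dropWhile nsp ++ ' ' :: ys := by
  induction cs with
  | nil => simp [nsp_space]
  | cons c cs ih => cases h : nsp c <;> simp [h, ih]

lemma splitW_append_space (xs ys : List Char) : splitW (xs ++ ' ' :: ys) = splitW xs ++ splitW ys := by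
  suffices h : ∀ (n : Nat) (xs : List Char), xs.length ≤ n →
      splitW (xs ++ ' ' :: ys) = splitW xs ++ splitW ys from h xs.length xs le_rfl
  intro n
  induction n with
  | zero =>
    intro xs hxs
    have h0 : xs = [] := by cases xs with | nil => rfl | cons a b => simp at hxs
    subst h0
    simp only [List.nil_append, splitW]
    rw [if_pos (by decide)]
  | succ n ih =>
    intro xs hxs
    cases xs with
    | nil =>
      simp only [List.nil_append, splitW]
      rw [if_pos (by decide)]
    | cons c cs =>
      by_cases hc : PySem.Chars.isspace c = true
      · rw [List.cons_append]
        simp only [splitW, hc, if_true]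
        exact ih cs (by simpa using Nat.le_of_succ_le_succ hxs)
      · rw [List.cons_append]
        simp only [splitW, hc, Bool.false_eq_true, if_false]
        rw [takeWhile_append_stop, dropWhile_append_stop]
        have hlen : (cs.dropWhile nsp).length ≤ n := by
          have := List.length_dropWhile_le nsp cs
          simp only [List.length_cons] at hxs
          omega
        rw [ih (cs.dropWhile nsp) hlen]
        simp

lemma splitW_join (l : List (List Char)) :
    splitW (PySem.Chars.join [' '] l) = l.flatMap splitW := by
  induction l with
  | nil =>
    simp only [PySem.Chars.join, List.intercalate, List.flatMap_nil, List.flatten_nil,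
      List.intersperse]
    simp [splitW]
  | cons x t ih =>
    cases t with
    | nil =>
      simp [PySem.Chars.join, List.intercalate]
    | cons y t' =>
      rw [PySem.Chars.join_cons_cons]
      have h1 : x ++ [' '] ++ PySem.Chars.join [' '] (y :: t') = x ++ ' ' :: PySem.Chars.join [' '] (y :: t') := by simp
      rw [h1, splitW_append_space, ih]
      simp

-- the central commutation: splitting the transformed text = transforming the words
lemma splitW_lrun (s : List Char) (f : Bool) :
    splitW ((lrun f s).1) = (lwords f (splitW s)).1 := by
  suffices h : ∀ (n : Nat) (s : List Char) (f : Bool), s.length ≤ n →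
      splitW ((lrun f s).1) = (lwords f (splitW s)).1 from h s.length s f le_rfl
  intro n
  induction n with
  | zero =>
    intro s f hs
    have h0 : s = [] := by cases s with | nil => rfl | cons a b => simp at hs
    subst h0
    simp [lrun, splitW, lwords]
  | succ n ih =>
    intro s f hs
    cases s with
    | nil => simp [lrun, splitW, lwords]
    | cons c cs =>
      by_cases hc : PySem.Chars.isspace c = true
      · have hst : lstep f c = (c, f) := lstep_space hc f
        simp only [lrun, hst]
        simp only [splitW, hc, if_true]
        exact ih cs f (by simpa using Nat.le_of_succ_le_succ hs)
      · have hcs : cs.takeWhile nsp ++ cs.dropWhile nsp = cs := List.takeWhile_append_dropWhile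
        have hw : ∀ d ∈ cs.takeWhile nsp, nsp d = true := fun d hd => List.mem_takeWhile_imp hd
        have hout : PySem.Chars.isspace ((lstep f c).1) = false := by
          rw [isspace_lstep]; simpa using hc
        simp only [lrun]
        conv_lhs => rw [← hcs]
        rw [lrun_append]
        rw [show ∀ (L : List Char), splitW ((lstep f c).1 :: L) =
              ((lstep f c).1 :: L.takeWhile nsp) :: splitW (L.dropWhile nsp) from fun L => by
            simp only [splitW, hout, Bool.false_eq_true, if_false]]
        have hwn : ∀ x ∈ (lrun (lstep f c).2 (cs.takeWhile nsp)).1, nsp x = true :=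
          lrun_nsp hw (lstep f c).2
        set f2 := (lrun (lstep f c).2 (cs.takeWhile nsp)).2 with hf2
        have htail : (lrun f2 (cs.dropWhile nsp)).1.takeWhile nsp = [] ∧
            (lrun f2 (cs.dropWhile nsp)).1.dropWhile nsp = (lrun f2 (cs.dropWhile nsp)).1 := by
          cases hr : cs.dropWhile nsp with
          | nil => simp [lrun]
          | cons d r' =>
            have hd : PySem.Chars.isspace d = true := nsp_dropWhile_head hr
            have hds : lstep f2 d = (d, f2) := lstep_space hd f2
            simp only [lrun, hds]
            constructor
            · rw [List.takeWhile_cons, if_neg (by simp [nsp, hd])]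
            · rw [List.dropWhile_cons, if_neg (by simp [nsp, hd])]
        rw [List.takeWhile_append_of_pos hwn, List.dropWhile_append_of_pos hwn, htail.1, htail.2]
        have hrlen : (cs.dropWhile nsp).length ≤ n := by
          have := List.length_dropWhile_le nsp cs
          simp only [List.length_cons] at hs
          omega
        rw [ih (cs.dropWhile nsp) f2 hrlen]
        rw [show splitW (c :: cs) = (c :: cs.takeWhile nsp) :: splitW (cs.dropWhile nsp) from by
          simp only [splitW, hc, Bool.false_eq_true, if_false]]
        simp [lwords, lrun, hf2]

-- B's folds are bgo
def wbody (wst : List (List Char) × Bool) (word : String) : List (List Char) × Bool :=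
  let cs := (PySem.Str.lower word).toList.foldl gbody (([] : List Char), wst.2)
  (wst.1 ++ [cs.1], cs.2)

def cbody (st : List String × Bool) (caption : String) : List String × Bool :=
  let ws := (PySem.Str.split₀ caption).foldl wbody (([] : List (List Char)), st.2)
  (st.1 ++ [String.ofList (PySem.Chars.join [' '] ws.1)], ws.2)

lemma portB_eq (captions : List String) :
    convertCaptionsCamelCase_alt captions = (captions.foldl cbody (([] : List String), false)).1 := rfl

lemma wfold (ws : List String) : ∀ (acc : List (List Char)) (f : Bool),
    ws.foldl wbody (acc, f) =
      (acc ++ (lwords f (ws.map String.toList)).1, (lwords f (ws.map String.toList)).2) := by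
  induction ws with
  | nil => intro acc f; simp [lwords]
  | cons w ws ih =>
    intro acc f
    simp only [List.foldl_cons, List.map_cons]
    have h1 : wbody (acc, f) w = (acc ++ [(lrun f w.toList).1], (lrun f w.toList).2) := by
      simp only [wbody, PySem.Str.toList_lower, foldl_gbody, List.nil_append]
    rw [h1, ih]
    simp [lwords]

lemma cfold (caps : List String) : ∀ (acc : List String) (f : Bool),
    caps.foldl cbody (acc, f) = (acc ++ (bgo f caps).1, (bgo f caps).2) := by
  induction caps with
  | nil => intro acc f; simp [bgo]
  | cons cap caps ih =>
    intro acc f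
    simp only [List.foldl_cons]
    have hmap : (PySem.Str.split₀ cap).map String.toList = splitW cap.toList := by
      rw [PySem.Str.split₀_map_toList, split₀_eq_splitW]
    have h1 : cbody (acc, f) cap =
        (acc ++ [String.ofList (PySem.Chars.join [' '] (lwords f (splitW cap.toList)).1)],
         (lwords f (splitW cap.toList)).2) := by
      simp only [cbody, wfold, hmap, List.nil_append]
    rw [h1, ih]
    simp [bgo]

-- A's port pieces
def abody (W : List (List Char)) (st : List String × Int) (ctr : Int) : List String × Int :=
  (st.1 ++ [String.ofList (PySem.Chars.join [' ']
      (PySem.List.slice W (some st.2) (some (st.2 + ctr))))], st.2 + ctr)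

lemma portA_eq (captions : List String) :
    convertCaptionsCamelCase captions =
      ((captions.map (fun caption => ((PySem.Str.split₀ caption).length : Int))).foldl
        (abody (PySem.Chars.split₀
          (((PySem.Str.lower (PySem.Str.join " " captions)).toList).foldl gbody
            (([] : List Char), false)).1))
        (([] : List String), (0 : Int))).1 := rfl

-- A's regrouping fold produces bgo
lemma A_regroup : ∀ (caps : List String) (W P : List (List Char)) (f : Bool) (acc : List String),
    W = P ++ (lwords f (caps.flatMap (fun c => splitW c.toList))).1 →
    ((caps.map (fun c => ((splitW c.toList).length : Int))).foldl (abody W)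
       (acc, (P.length : Int))).1
    = acc ++ (bgo f caps).1 := by
  intro caps
  induction caps with
  | nil => intro W P f acc hW; simp [bgo]
  | cons cap caps ih =>
    intro W P f acc hW
    rw [List.flatMap_cons, lwords_append] at hW
    simp only [List.map_cons, List.foldl_cons]
    have hlen1 : (lwords f (splitW cap.toList)).1.length = (splitW cap.toList).length :=
      lwords_length _ _
    have hslice : PySem.List.slice W (some (P.length : Int))
        (some ((P.length : Int) + ((splitW cap.toList).length : Int)))
        = (lwords f (splitW cap.toList)).1 := by
      rw [PySem.List.slice_toNat W (Int.natCast_nonneg _) (by positivity)]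
      have h2 : (((P.length : Int)) + ((splitW cap.toList).length : Int)).toNat
          = P.length + (splitW cap.toList).length := by omega
      rw [h2, Int.toNat_natCast, hW, List.drop_left]
      have h3 : P.length + (splitW cap.toList).length - P.length = (splitW cap.toList).length := by
        omega
      rw [h3, ← hlen1, List.take_left]
    have hstep : abody W (acc, (P.length : Int)) ((splitW cap.toList).length : Int) =
        (acc ++ [String.ofList (PySem.Chars.join [' '] (lwords f (splitW cap.toList)).1)],
         ((P ++ (lwords f (splitW cap.toList)).1).length : Int)) := by
      simp only [abody, hslice]
      have h4 : (P.length : Int) + ((splitW cap.toList).length : Int)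
          = ((P ++ (lwords f (splitW cap.toList)).1).length : Int) := by
        simp only [List.length_append, hlen1]
        push_cast
        ring
      rw [h4]
    rw [hstep]
    rw [ih W (P ++ (lwords f (splitW cap.toList)).1) (lwords f (splitW cap.toList)).2
        (acc ++ [String.ofList (PySem.Chars.join [' '] (lwords f (splitW cap.toList)).1)])
        (by rw [hW]; simp)]
    simp [bgo]

-- ===== VERDICT (by name: the statement is the Claim_ definition above) =====
theorem convertCaptionsCamelCase_spec : Claim_equal_convertCaptionsCamelCase := by
  intro captions _
  unfold Spec_convertCaptionsCamelCase
  rw [portA_eq, portB_eq, cfold]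
  have htext : (PySem.Str.lower (PySem.Str.join " " captions)).toList =
      PySem.Chars.lower (PySem.Chars.join [' '] (captions.map String.toList)) := by
    rw [PySem.Str.toList_lower, PySem.Str.toList_join]
    rfl
  rw [htext, foldl_gbody]
  simp only [List.nil_append]
  rw [split₀_eq_splitW, splitW_lrun, splitW_join]
  have hmap : captions.map (fun caption => ((PySem.Str.split₀ caption).length : Int)) =
      captions.map (fun c => ((splitW c.toList).length : Int)) := by
    apply List.map_congr_left
    intro c _
    have h1 : (PySem.Str.split₀ c).length = (splitW c.toList).length := by
      rw [← split₀_eq_splitW, ← PySem.Str.split₀_map_toList c, List.length_map]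
    rw [h1]
  have hflat : (captions.map String.toList).flatMap splitW =
      captions.flatMap (fun c => splitW c.toList) := by
    rw [List.flatMap_map]
  rw [hmap, hflat]
  have := A_regroup captions
      ((lwords false (captions.flatMap (fun c => splitW c.toList))).1) [] false [] (by simp)
  simpa using this
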